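-- pv_equiv track=rewrite | github.com/Touring-686/vigil | vigil/abstract_sketch.py | _infer_tool_operation
-- ===== SOURCE A (Python) =====
-- def _infer_tool_operation(tool_name: str, tool_desc: str) -> str:
--
--     combined = f"{tool_name} {tool_desc}".lower()
--
--     if any(kw in combined for kw in ["delete", "remove", "drop"]):
--         return "DELETE"
--     elif any(kw in combined for kw in ["send", "email", "message", "notify", "post"]):
--         return "SEND"
--     elif any(kw in combined for kw in ["create", "add", "new"]):
--         return "CREATE"
--     elif any(kw in combined for kw in ["update", "modify", "change", "edit"]):
--         return "UPDATE"
--     elif any(kw in combined for kw in ["write", "save"]):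
--         return "WRITE"
--     elif any(kw in combined for kw in ["get", "read", "fetch", "list", "search", "view"]):
--         return "READ"
--     else:
--         return "READ"  # 默认假设为READ
-- ===== SOURCE B (Python) =====
-- # Single left-to-right scan of the combined text: at each position, match the
-- # fixed keyword->priority table and keep the minimum priority seen; map it to a label.
-- KEYWORDS = [
--     ("delete", 0), ("remove", 0), ("drop", 0),
--     ("send", 1), ("email", 1), ("message", 1), ("notify", 1), ("post", 1),
--     ("create", 2), ("add", 2), ("new", 2),
--     ("update", 3), ("modify", 3), ("change", 3), ("edit", 3),
--     ("write", 4), ("save", 4),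
--     ("get", 5), ("read", 5), ("fetch", 5), ("list", 5), ("search", 5), ("view", 5),
-- ]
-- LABELS = ["DELETE", "SEND", "CREATE", "UPDATE", "WRITE", "READ"]
--
--
-- def _infer_tool_operation(tool_name: str, tool_desc: str) -> str:
--     combined = f"{tool_name} {tool_desc}".lower()
--     best = 6
--     for i in range(len(combined)):
--         for kw, p in KEYWORDS:
--             if p < best and combined.startswith(kw, i):
--                 best = p
--     return LABELS[best] if best < 6 else "READ"
-- ===== Notes on version B (the rewrite author's own statement) =====
-- stated objective: alternative
-- what changed: Replaces six independent substring-search branches ('kw in combined' per group, early-return chain) by one left-to-right scan of the combined text that matches a flat keyword->priority table at each position and keeps the minimum priority, mapped to a label at the end.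
import Mathlib
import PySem

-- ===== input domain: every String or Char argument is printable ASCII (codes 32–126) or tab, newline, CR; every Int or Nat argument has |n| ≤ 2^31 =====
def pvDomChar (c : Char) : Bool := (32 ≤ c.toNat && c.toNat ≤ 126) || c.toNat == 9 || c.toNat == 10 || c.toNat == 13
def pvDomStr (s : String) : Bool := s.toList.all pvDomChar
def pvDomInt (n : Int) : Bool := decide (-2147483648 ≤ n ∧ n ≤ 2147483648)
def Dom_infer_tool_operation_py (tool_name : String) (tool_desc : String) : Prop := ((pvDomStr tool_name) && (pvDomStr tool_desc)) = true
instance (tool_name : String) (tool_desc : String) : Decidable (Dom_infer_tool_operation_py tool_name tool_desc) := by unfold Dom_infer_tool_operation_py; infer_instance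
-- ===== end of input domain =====

-- B replaces A's six substring-search branches by one positional scan of the text
-- against a flat keyword->priority table, keeping the minimum priority; same value everywhere.

-- ===== PORT A =====
def infer_tool_operation_py (tool_name : String) (tool_desc : String) : String :=
  let combined := PySem.Str.lower (tool_name ++ " " ++ tool_desc)
  if ["delete", "remove", "drop"].any (fun kw => PySem.Str.isIn kw combined) then
    "DELETE"
  else if ["send", "email", "message", "notify", "post"].any (fun kw => PySem.Str.isIn kw combined) then
    "SEND"
  else if ["create", "add", "new"].any (fun kw => PySem.Str.isIn kw combined) then
    "CREATE"
  else if ["update", "modify", "change", "edit"].any (fun kw => PySem.Str.isIn kw combined) then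
    "UPDATE"
  else if ["write", "save"].any (fun kw => PySem.Str.isIn kw combined) then
    "WRITE"
  else if ["get", "read", "fetch", "list", "search", "view"].any (fun kw => PySem.Str.isIn kw combined) then
    "READ"
  else
    "READ"

-- ===== PORT B =====
def pvKeywords : List (List Char × Nat) :=
  [("delete".toList, 0), ("remove".toList, 0), ("drop".toList, 0),
   ("send".toList, 1), ("email".toList, 1), ("message".toList, 1), ("notify".toList, 1), ("post".toList, 1),
   ("create".toList, 2), ("add".toList, 2), ("new".toList, 2),
   ("update".toList, 3), ("modify".toList, 3), ("change".toList, 3), ("edit".toList, 3),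
   ("write".toList, 4), ("save".toList, 4),
   ("get".toList, 5), ("read".toList, 5), ("fetch".toList, 5), ("list".toList, 5), ("search".toList, 5), ("view".toList, 5)]

def pvLabels : List String := ["DELETE", "SEND", "CREATE", "UPDATE", "WRITE", "READ"]

-- the 'for i in range(len(combined)): for kw, p in KEYWORDS: if p < best and combined.startswith(kw, i)' scan
def pvScan : List Char → Nat → Nat
  | [], best => best
  | c :: rest, best =>
      pvScan rest (pvKeywords.foldl
        (fun b kp => if kp.2 < b && kp.1.isPrefixOf (c :: rest) then kp.2 else b) best)

def infer_tool_operation_py_alt (tool_name : String) (tool_desc : String) : String :=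
  let combined := PySem.Str.lower (tool_name ++ " " ++ tool_desc)
  let best := pvScan combined.toList 6
  if best < 6 then pvLabels.getD best "READ" else "READ"

-- ===== PRECONDITION & SPEC =====
def Spec_infer_tool_operation_py (tool_name : String) (tool_desc : String) (out : String) : Prop := out = infer_tool_operation_py_alt tool_name tool_desc
instance (tool_name : String) (tool_desc : String) (out : String) : Decidable (Spec_infer_tool_operation_py tool_name tool_desc out) := by unfold Spec_infer_tool_operation_py; infer_instance

-- ===== CLAIM (what is proved, stated in full; the proofs are below) =====
def Claim_equal_infer_tool_operation_py : Prop := ∀ (tool_name : String) (tool_desc : String), Dom_infer_tool_operation_py tool_name tool_desc → Spec_infer_tool_operation_py tool_name tool_desc (infer_tool_operation_py tool_name tool_desc)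

-- ===== LEMMAS AND PROOFS =====

-- the scan's inner update, parametrised by the per-keyword test
def pvUpd (sel : List Char → Bool) (b : Nat) (kp : List Char × Nat) : Nat :=
  if kp.2 < b && sel kp.1 then kp.2 else b

-- the same update written as a min with a constant candidate
def pvMinU (g : List Char × Nat → Nat) (b : Nat) (kp : List Char × Nat) : Nat :=
  min b (g kp)

lemma pvMinU_fold_min (g : List Char × Nat → Nat) :
    ∀ (L : List (List Char × Nat)) (b c : Nat),
      L.foldl (pvMinU g) (min b c) = min b (L.foldl (pvMinU g) c) := by
  intro L
  induction L with
  | nil => intro b c; rfl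
  | cons x t ih =>
      intro b c
      simp only [List.foldl_cons, pvMinU, Nat.min_assoc]
      exact ih b (min c (g x))

lemma pvMinU_fold_or (gp gq : List Char × Nat → Nat) :
    ∀ (L : List (List Char × Nat)) (b : Nat),
      L.foldl (pvMinU (fun kp => min (gp kp) (gq kp))) b
        = L.foldl (pvMinU gq) (L.foldl (pvMinU gp) b) := by
  intro L
  induction L with
  | nil => intro b; rfl
  | cons x t ih =>
      intro b
      simp only [List.foldl_cons, pvMinU]
      rw [ih]
      congr 1
      have : min (min b (gp x)) (gq x) = min (gq x) (min b (gp x)) := Nat.min_comm _ _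
      calc t.foldl (pvMinU gp) (min b (min (gp x) (gq x)))
          = t.foldl (pvMinU gp) (min (gq x) (min b (gp x))) := by
            congr 1; omega
        _ = min (gq x) (t.foldl (pvMinU gp) (min b (gp x))) := pvMinU_fold_min gp t _ _
        _ = min (t.foldl (pvMinU gp) (min b (gp x))) (gq x) := Nat.min_comm _ _

lemma pvUpd_fold_le (sel : List Char → Bool) :
    ∀ (L : List (List Char × Nat)) (b : Nat), L.foldl (pvUpd sel) b ≤ b := by
  intro L
  induction L with
  | nil => intro b; exact le_rfl
  | cons x t ih =>
      intro b
      simp only [List.foldl_cons, pvUpd]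
      by_cases h : (x.2 < b && sel x.1) = true
      · rw [if_pos h]
        simp only [Bool.and_eq_true, decide_eq_true_eq] at h
        exact le_trans (ih _) h.1.le
      · rw [if_neg h]
        exact ih b

lemma pvUpd_eq_min (sel : List Char → Bool) :
    ∀ (L : List (List Char × Nat)) (b : Nat), b ≤ 6 → (∀ kp ∈ L, kp.2 ≤ 6) →
      L.foldl (pvUpd sel) b = L.foldl (pvMinU (fun kp => if sel kp.1 then kp.2 else 6)) b := by
  intro L
  induction L with
  | nil => intro b _ _; rfl
  | cons x t ih =>
      intro b hb hL
      have hx : x.2 ≤ 6 := hL x (by simp)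
      have hstep : pvUpd sel b x = pvMinU (fun kp => if sel kp.1 then kp.2 else 6) b x := by
        by_cases hs : sel x.1 = true
        · simp [pvUpd, pvMinU, hs]; split <;> omega
        · simp only [Bool.not_eq_true] at hs
          simp [pvUpd, pvMinU, hs]; omega
      have hacc : pvMinU (fun kp => if sel kp.1 then kp.2 else 6) b x ≤ 6 := by
        simp only [pvMinU]; omega
      simp only [List.foldl_cons, hstep]
      exact ih _ hacc (fun kp h => hL kp (by simp [h]))

lemma pv_occ_cons (kw : List Char) (c : Char) (rest : List Char) :
    PySem.Chars.isIn kw (c :: rest)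
      = (kw.isPrefixOf (c :: rest) || PySem.Chars.isIn kw rest) := by
  by_cases h : (kw.isPrefixOf (c :: rest) || PySem.Chars.isIn kw rest) = true
  · rw [h]
    rcases Bool.or_eq_true_iff.mp h with h1 | h2
    · have hp : kw <+: (c :: rest) := by
        simpa using List.isPrefixOf_iff_prefix.mp h1
      exact (PySem.Chars.exists_prefix_drop_iff_isIn kw (c :: rest)).mp ⟨0, by simpa using hp⟩
    · obtain ⟨j, hj⟩ := (PySem.Chars.exists_prefix_drop_iff_isIn kw rest).mpr h2
      exact (PySem.Chars.exists_prefix_drop_iff_isIn kw (c :: rest)).mp ⟨j + 1, by simpa using hj⟩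
  · rw [Bool.not_eq_true] at h
    rw [h]
    rw [Bool.or_eq_false_iff] at h
    obtain ⟨h1, h2⟩ := h
    by_contra hin
    rw [Bool.not_eq_false] at hin
    obtain ⟨j, hj⟩ := (PySem.Chars.exists_prefix_drop_iff_isIn kw (c :: rest)).mpr hin
    cases j with
    | zero =>
        simp only [List.drop_zero] at hj
        exact absurd (List.isPrefixOf_iff_prefix.mpr hj) (by simp [h1])
    | succ k =>
        have : PySem.Chars.isIn kw rest = true :=
          (PySem.Chars.exists_prefix_drop_iff_isIn kw rest).mp ⟨k, by simpa using hj⟩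
        simp [this] at h2

set_option maxRecDepth 8000 in
lemma pvScan_eq_isIn_fold :
    ∀ (s : List Char) (best : Nat), best ≤ 6 →
      pvScan s best
        = pvKeywords.foldl (pvUpd (fun kw => PySem.Chars.isIn kw s)) best := by
  intro s
  induction s with
  | nil =>
      intro best _
      have hnil : ∀ kp ∈ pvKeywords, PySem.Chars.isIn kp.1 ([] : List Char) = false := by
        intro kp hkp
        rw [PySem.Chars.isIn_eq_false_iff]
        intro hinf
        have h0 : kp.1 = [] := List.eq_nil_of_infix_nil hinf
        revert h0
        fin_cases hkp <;> decide
      have hfold : pvKeywords.foldl (pvUpd (fun kw => PySem.Chars.isIn kw ([] : List Char))) best = best := by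
        rw [PySem.List.foldl_congr_mem pvKeywords _ (fun b (_ : List Char × Nat) => b) best
          (by intro acc x hx; simp [pvUpd, hnil x hx])]
        simp
      simp [pvScan, hfold]
  | cons c rest ih =>
      intro best hb
      have h6 : ∀ kp ∈ pvKeywords, kp.2 ≤ 6 := by intro kp hkp; fin_cases hkp <;> norm_num
      rw [pvScan]
      have hinner :
          pvKeywords.foldl (fun b kp => if kp.2 < b && kp.1.isPrefixOf (c :: rest) then kp.2 else b) best
            = pvKeywords.foldl (pvUpd (fun kw => kw.isPrefixOf (c :: rest))) best := rfl
      rw [hinner, ih _ (pvUpd_fold_le _ _ _ |>.trans hb)]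
      rw [pvUpd_eq_min _ _ _ (pvUpd_fold_le _ _ _ |>.trans hb) h6,
          pvUpd_eq_min _ _ _ hb h6, pvUpd_eq_min _ _ _ hb h6]
      rw [← pvMinU_fold_or]
      apply PySem.List.foldl_congr_mem
      intro acc kp hkp
      have hk6 : kp.2 ≤ 6 := h6 kp hkp
      simp only [pvMinU, pv_occ_cons]
      by_cases hp : kp.1.isPrefixOf (c :: rest) = true <;>
        by_cases hr : PySem.Chars.isIn kp.1 rest = true <;>
          simp [hp, hr] <;> omega

-- folding one priority group: if any keyword of the group matches, min in its priority
lemma pv_fold_group (sel : List Char → Bool) (p : Nat) :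
    ∀ (G : List (List Char × Nat)) (b : Nat), (∀ kp ∈ G, kp.2 = p) →
      G.foldl (pvUpd sel) b = if G.any (fun kp => sel kp.1) then min b p else b := by
  intro G
  induction G with
  | nil => intro b _; simp
  | cons x t ih =>
      intro b hG
      have hx : x.2 = p := hG x (by simp)
      have ht : ∀ kp ∈ t, kp.2 = p := fun kp h => hG kp (by simp [h])
      simp only [List.foldl_cons, List.any_cons]
      by_cases hs : sel x.1 = true
      · have hstep : pvUpd sel b x = min b p := by
          simp [pvUpd, hs, hx]; split <;> omega
        rw [hstep, ih _ ht]
        simp only [hs, Bool.true_or, if_true]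
        split <;> omega
      · have hstep : pvUpd sel b x = b := by
          simp only [Bool.not_eq_true] at hs
          simp [pvUpd, hs]
        rw [Bool.not_eq_true] at hs
        rw [hstep, ih _ ht]
        simp only [hs, Bool.false_or]

-- ===== VERDICT (by name: the statement is the Claim_ definition above) =====
set_option maxRecDepth 8000 in
set_option maxHeartbeats 2000000 in
theorem infer_tool_operation_py_spec : Claim_equal_infer_tool_operation_py := by
  intro tool_name tool_desc _
  unfold Spec_infer_tool_operation_py
  simp only [infer_tool_operation_py, infer_tool_operation_py_alt]
  rw [pvScan_eq_isIn_fold _ 6 (by omega)]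
  -- split the fold over the table into the six priority groups
  have hsplit : pvKeywords
      = [("delete".toList, 0), ("remove".toList, 0), ("drop".toList, 0)]
        ++ [("send".toList, 1), ("email".toList, 1), ("message".toList, 1), ("notify".toList, 1), ("post".toList, 1)]
        ++ [("create".toList, 2), ("add".toList, 2), ("new".toList, 2)]
        ++ [("update".toList, 3), ("modify".toList, 3), ("change".toList, 3), ("edit".toList, 3)]
        ++ [("write".toList, 4), ("save".toList, 4)]
        ++ [("get".toList, 5), ("read".toList, 5), ("fetch".toList, 5), ("list".toList, 5), ("search".toList, 5), ("view".toList, 5)] := rfl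
  rw [hsplit]
  simp only [List.foldl_append]
  rw [pv_fold_group _ 5 _ _ (by decide), pv_fold_group _ 4 _ _ (by decide),
      pv_fold_group _ 3 _ _ (by decide), pv_fold_group _ 2 _ _ (by decide),
      pv_fold_group _ 1 _ _ (by decide), pv_fold_group _ 0 _ _ (by decide)]
  simp only [List.any_cons, List.any_nil, PySem.Str.isIn_eq]
  split_ifs <;> simp [pvLabels] <;> omega
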